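-- pv_equiv track=rewrite | github.com/LU-zhw323/Bioinformatics-CSE308 | P1_Zhenyu Wu/Project1/Implementation/assemble.py | clear_same_contig
-- ===== SOURCE A (Python) =====
-- def clear_same_contig(tb):
-- 	output = []
-- 	for i in tb:
-- 		if i not in output:
-- 			if not any(i in s for s in output):
-- 				output.append(i)
-- 	res = []
-- 	for i in output:
-- 		if i not in res:
-- 			if not any(i in s and i != s for s in output):
-- 				res.append(i)
-- 	#for i in reversed(output):
-- 		#if i not in res:
-- 			#if not any(i in s for s in res):
-- 				#res.append(i)
-- 	return res
-- ===== SOURCE B (Python) =====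
-- def _maximal(tb, s):
--     return all(s == t or s not in t for t in tb)
--
-- def clear_same_contig(tb):
--     seen = set()
--     out = []
--     for s in tb:
--         if s not in seen and _maximal(tb, s):
--             out.append(s)
--         seen.add(s)
--     return out
-- ===== Notes on version B (the rewrite author's own statement) =====
-- stated objective: simpler
-- what changed: A builds an intermediate list in two quadratic passes (dedup + drop substrings of earlier kept strings, then re-filter against that evolving list); B makes one pass with a seen-set, keeping each first occurrence that is not a proper substring of ANY input string.
import Mathlib
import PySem

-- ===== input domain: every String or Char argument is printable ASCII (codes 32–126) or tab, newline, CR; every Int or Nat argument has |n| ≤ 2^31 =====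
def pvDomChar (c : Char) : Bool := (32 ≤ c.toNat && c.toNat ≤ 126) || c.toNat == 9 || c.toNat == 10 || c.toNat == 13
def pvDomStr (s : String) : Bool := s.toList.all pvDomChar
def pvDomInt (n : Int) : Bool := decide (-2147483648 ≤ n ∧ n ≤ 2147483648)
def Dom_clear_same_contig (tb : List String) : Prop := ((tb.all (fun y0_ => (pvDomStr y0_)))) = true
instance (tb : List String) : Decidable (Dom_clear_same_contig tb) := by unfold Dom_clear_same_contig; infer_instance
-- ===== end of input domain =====

-- B replaces A's two quadratic passes over an evolving intermediate list by ONE pass with a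
-- seen-set, keeping each first occurrence that is not a proper substring of any input string
-- (objective: simpler; same asymptotic cost).

-- ===== PORT A =====
-- first loop body: dedup and drop strings contained in an earlier kept string
def pvA_keep1 (output : List String) (i : String) : List String :=
  if i ∈ output then output
  else if output.any (fun s => PySem.Str.isIn i s) then output
  else output ++ [i]

-- second loop body: re-filter `output` by proper containment in `output`
def pvA_keep2 (output : List String) (res : List String) (i : String) : List String :=
  if i ∈ res then res
  else if output.any (fun s => PySem.Str.isIn i s && i != s) then res
  else res ++ [i]

def clear_same_contig (tb : List String) : List String :=
  let output := tb.foldl pvA_keep1 []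
  output.foldl (pvA_keep2 output) []

-- ===== PORT B =====
-- `all(s == t or s not in t for t in tb)`
def pvB_maximal (tb : List String) (s : String) : Bool :=
  tb.all (fun t => s == t || !(PySem.Str.isIn s t))

-- loop body: out, seen ↦ out', seen ∪ {s}
def pvB_step (tb : List String) (acc : List String × PySem.Set String) (s : String) :
    List String × PySem.Set String :=
  if !(PySem.Set.contains acc.2 s) && pvB_maximal tb s then (acc.1 ++ [s], acc.2.add s)
  else (acc.1, acc.2.add s)

def clear_same_contig_alt (tb : List String) : List String :=
  (tb.foldl (pvB_step tb) ([], PySem.Set.empty)).1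

-- ===== PRECONDITION & SPEC =====
def Spec_clear_same_contig (tb : List String) (out : List String) : Prop := out = clear_same_contig_alt tb
instance (tb : List String) (out : List String) : Decidable (Spec_clear_same_contig tb out) := by unfold Spec_clear_same_contig; infer_instance

-- ===== CLAIM (what is proved, stated in full; the proofs are below) =====
def Claim_equal_clear_same_contig : Prop := ∀ (tb : List String), Dom_clear_same_contig tb → Spec_clear_same_contig tb (clear_same_contig tb)

-- ===== LEMMAS AND PROOFS =====

-- strings are equal iff their character lists are
theorem pv_toList_inj {a b : String} (h : a.toList = b.toList) : a = b :=
  String.toList_inj.mp h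

-- mutual infixes are equal
theorem pv_infix_antisymm {a b : String}
    (h1 : a.toList <:+: b.toList) (h2 : b.toList <:+: a.toList) : a = b :=
  pv_toList_inj (h1.sublist.eq_of_length (le_antisymm h1.length_le h2.length_le))

-- pass 1 never removes elements
theorem pvA1_mono (l out : List String) (s : String) (hs : s ∈ out) :
    s ∈ l.foldl pvA_keep1 out := by
  induction l generalizing out with
  | nil => exact hs
  | cons a l ih =>
      refine ih _ ?_
      unfold pvA_keep1
      split_ifs <;> simp [hs]

-- pass 1 yields elements of out ∪ l
theorem pvA1_subset (l out : List String) (s : String) (hs : s ∈ l.foldl pvA_keep1 out) :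
    s ∈ out ∨ s ∈ l := by
  induction l generalizing out with
  | nil => exact Or.inl hs
  | cons a l ih =>
      rcases ih _ hs with h | h
      · unfold pvA_keep1 at h
        split_ifs at h
        · exact Or.inl h
        · exact Or.inl h
        · rcases List.mem_append.mp h with h | h
          · exact Or.inl h
          · simp at h; simp [h]
      · simp [h]

-- pass 1 keeps the accumulator duplicate-free
theorem pvA1_nodup (l : List String) (out : List String) (h : out.Nodup) :
    (l.foldl pvA_keep1 out).Nodup := by
  induction l generalizing out with
  | nil => exact h
  | cons a l ih =>
      refine ih _ ?_
      unfold pvA_keep1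
      split_ifs with h1 h2
      · exact h
      · exact h
      · simpa [List.nodup_append] using ⟨h, fun b hb e => h1 (e ▸ hb)⟩

-- every processed string is an infix of some kept string
theorem pvA1_cover (l out : List String) (t : String) (ht : t ∈ out ∨ t ∈ l) :
    ∃ s ∈ l.foldl pvA_keep1 out, t.toList <:+: s.toList := by
  induction l generalizing out with
  | nil =>
      rcases ht with ht | ht
      · exact ⟨t, ht, List.infix_refl _⟩
      · simp at ht
  | cons a l ih =>
      rcases ht with ht | ht
      · exact ih _ (Or.inl (by
          unfold pvA_keep1; split_ifs <;> simp [ht]))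
      · rcases List.mem_cons.mp ht with rfl | ht
        · by_cases h1 : t ∈ out
          · exact ih _ (Or.inl (by unfold pvA_keep1; split_ifs <;> simp [h1]))
          · by_cases h2 : out.any (fun s => PySem.Str.isIn t s)
            · simp only [List.any_eq_true] at h2
              obtain ⟨s, hs, hin⟩ := h2
              refine ⟨s, pvA1_mono _ _ _ hs, ?_⟩
              exact (PySem.Str.isIn_iff_infix _ _).mp hin
            · refine ih _ (Or.inl ?_)
              unfold pvA_keep1
              rw [if_neg h1, if_neg h2]
              exact List.mem_append_right _ (by simp)
        · exact ih _ (Or.inr ht)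

-- the pass-2 proper-containment test over `output` agrees with B's test over `tb`
theorem pv_cond_eq (tb : List String) (i : String) :
    ((tb.foldl pvA_keep1 []).any (fun s => PySem.Str.isIn i s && i != s))
      = !(pvB_maximal tb i) := by
  rw [Bool.eq_iff_iff]
  have hR : (!(pvB_maximal tb i)) = true ↔ ∃ t ∈ tb, ¬ i = t ∧ i.toList <:+: t.toList := by
    simp [pvB_maximal, PySem.Chars.isIn_iff_infix]
  have hL : ((tb.foldl pvA_keep1 []).any (fun s => PySem.Str.isIn i s && i != s)) = true
      ↔ ∃ s ∈ tb.foldl pvA_keep1 [], PySem.Chars.isIn i.toList s.toList = true ∧ ¬ i = s := by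
    simp
  rw [hL, hR]
  constructor
  · rintro ⟨s, hs, hin, hne⟩
    have hstb : s ∈ tb := (pvA1_subset tb [] s hs).resolve_left (by simp)
    exact ⟨s, hstb, hne, (PySem.Chars.isIn_iff_infix _ _).mp hin⟩
  · rintro ⟨t, htb, hne, hin⟩
    obtain ⟨s, hs, hts⟩ := pvA1_cover tb [] t (Or.inr htb)
    refine ⟨s, hs, (PySem.Chars.isIn_iff_infix _ _).mpr (hin.trans hts), fun e => ?_⟩
    subst e
    exact hne (pv_infix_antisymm hts hin).symm

-- pass 2 over a duplicate-free list is a filter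
theorem pvA2_filter (output l r0 : List String) (hnd : l.Nodup)
    (hdisj : ∀ i ∈ l, i ∉ r0) :
    l.foldl (pvA_keep2 output) r0
      = r0 ++ l.filter (fun i => !(output.any (fun s => PySem.Str.isIn i s && i != s))) := by
  induction l generalizing r0 with
  | nil => simp
  | cons a l ih =>
      have ha : a ∉ r0 := hdisj a (by simp)
      simp only [List.foldl_cons, List.filter_cons]
      by_cases hq : (output.any (fun s => PySem.Str.isIn a s && a != s)) = true
      · have hstep : pvA_keep2 output r0 a = r0 := by
          unfold pvA_keep2; rw [if_neg ha, if_pos hq]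
        rw [hstep, ih _ (List.Nodup.of_cons hnd)
          (fun i hi => hdisj i (List.mem_cons_of_mem _ hi))]
        rw [hq]; simp
      · have hstep : pvA_keep2 output r0 a = r0 ++ [a] := by
          unfold pvA_keep2; rw [if_neg ha, if_neg hq]
        rw [hstep, ih _ (List.Nodup.of_cons hnd) (fun i hi => by
          simp only [List.mem_append, List.mem_singleton, not_or]
          exact ⟨hdisj i (List.mem_cons_of_mem _ hi),
            fun e => (List.nodup_cons.mp hnd).1 (e ▸ hi)⟩)]
        have hq' : (output.any fun s => PySem.Str.isIn a s && a != s) = false := by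
          simpa using hq
        rw [hq']; simp

-- coupled invariant: B's single pass computes the pvB_maximal-filter of A's first pass
theorem pv_main (tb : List String) (l outA outB : List String) (seen : PySem.Set String)
    (hnd : outA.Nodup)
    (hsubA : ∀ s ∈ outA, s ∈ tb) (hsubl : ∀ s ∈ l, s ∈ tb)
    (hfilter : outB = outA.filter (pvB_maximal tb))
    (hseenA : ∀ s ∈ outA, s ∈ seen)
    (hseen : ∀ s ∈ seen, s ∈ outA ∨ ∃ s' ∈ outA, s.toList <:+: s'.toList ∧ s ≠ s') :
    (l.foldl (pvB_step tb) (outB, seen)).1 = (l.foldl pvA_keep1 outA).filter (pvB_maximal tb) := by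
  induction l generalizing outA outB seen with
  | nil => exact hfilter
  | cons a l ih =>
      simp only [List.foldl_cons]
      have hatb : a ∈ tb := hsubl a (by simp)
      have hsubl' : ∀ s ∈ l, s ∈ tb := fun s hs => hsubl s (List.mem_cons_of_mem _ hs)
      by_cases hA1 : a ∈ outA
      · -- pass 1 skips a; B skips too because a was seen
        have hc : PySem.Set.contains seen a = true := (PySem.Set.contains_iff _ _).mpr (hseenA a hA1)
        have hcond : (!(PySem.Set.contains seen a) && pvB_maximal tb a) = false := by
          rw [hc]; rfl
        have hstep : pvB_step tb (outB, seen) a = (outB, seen.add a) := by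
          unfold pvB_step; rw [hcond]; simp
        have hk : pvA_keep1 outA a = outA := by simp [pvA_keep1, hA1]
        rw [hstep, hk]
        refine ih outA outB _ hnd hsubA hsubl' hfilter
          (fun s hs => (PySem.Set.mem_add _ _ _).mpr (Or.inl (hseenA s hs)))
          (fun s hs => ?_)
        rcases (PySem.Set.mem_add _ _ _).mp hs with h | rfl
        · exact hseen s h
        · exact Or.inl hA1
      · by_cases hq : (outA.any (fun s => PySem.Str.isIn a s)) = true
        · -- a dropped by pass 1 as a substring of a kept string; B drops it: not maximal
          simp only [List.any_eq_true] at hq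
          obtain ⟨s, hs, hin'⟩ := hq
          have hin : a.toList <:+: s.toList := (PySem.Str.isIn_iff_infix _ _).mp hin'
          have hne : a ≠ s := fun e => hA1 (e ▸ hs)
          have hpm : pvB_maximal tb a = false := by
            simp only [pvB_maximal, List.all_eq_false]
            refine ⟨s, hsubA s hs, ?_⟩
            simp [hne, PySem.Chars.isIn_iff_infix, hin]
          have hcond : (!(PySem.Set.contains seen a) && pvB_maximal tb a) = false := by
            rw [hpm]; simp
          have hstep : pvB_step tb (outB, seen) a = (outB, seen.add a) := by
            unfold pvB_step; rw [hcond]; simp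
          have hk : pvA_keep1 outA a = outA := by
            unfold pvA_keep1
            rw [if_neg hA1, if_pos (by simp only [List.any_eq_true]; exact ⟨s, hs, hin'⟩)]
          rw [hstep, hk]
          refine ih outA outB _ hnd hsubA hsubl' hfilter
            (fun t ht => (PySem.Set.mem_add _ _ _).mpr (Or.inl (hseenA t ht)))
            (fun t ht => ?_)
          rcases (PySem.Set.mem_add _ _ _).mp ht with h | rfl
          · exact hseen t h
          · exact Or.inr ⟨s, hs, hin, hne⟩
        · -- pass 1 keeps a; a was never seen before
          have hns : a ∉ seen := by
            intro hsn
            rcases hseen a hsn with h | ⟨s', hs', hin, hne⟩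
            · exact hA1 h
            · exact hq (by
                simp only [List.any_eq_true]
                exact ⟨s', hs', (PySem.Str.isIn_iff_infix _ _).mpr hin⟩)
          have hc : PySem.Set.contains seen a = false := by
            rw [← Bool.not_eq_true, PySem.Set.contains_iff]; exact hns
          have hk : pvA_keep1 outA a = outA ++ [a] := by
            unfold pvA_keep1; rw [if_neg hA1, if_neg hq]
          rw [hk]
          have hnd' : (outA ++ [a]).Nodup := by
            simpa [List.nodup_append] using ⟨hnd, fun b hb e => hA1 (e ▸ hb)⟩
          have hsubA' : ∀ s ∈ outA ++ [a], s ∈ tb := fun s hs => by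
            rcases List.mem_append.mp hs with h | h
            · exact hsubA s h
            · simp at h; exact h ▸ hatb
          have hseenA' : ∀ s ∈ outA ++ [a], s ∈ seen.add a := fun s hs => by
            rcases List.mem_append.mp hs with h | h
            · exact (PySem.Set.mem_add _ _ _).mpr (Or.inl (hseenA s h))
            · simp at h; exact (PySem.Set.mem_add _ _ _).mpr (Or.inr h)
          have hseen' : ∀ s ∈ seen.add a,
              s ∈ outA ++ [a] ∨ ∃ s' ∈ outA ++ [a], s.toList <:+: s'.toList ∧ s ≠ s' := fun s hs => by
            rcases (PySem.Set.mem_add _ _ _).mp hs with h | rfl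
            · rcases hseen s h with h' | ⟨s', hs', hin, hne⟩
              · exact Or.inl (List.mem_append_left _ h')
              · exact Or.inr ⟨s', List.mem_append_left _ hs', hin, hne⟩
            · exact Or.inl (List.mem_append_right _ (by simp))
          by_cases hpm : pvB_maximal tb a = true
          · have hcond : (!(PySem.Set.contains seen a) && pvB_maximal tb a) = true := by
              rw [hc, hpm]; rfl
            have hstep : pvB_step tb (outB, seen) a = (outB ++ [a], seen.add a) := by
              unfold pvB_step; rw [hcond]; simp
            rw [hstep]
            exact ih (outA ++ [a]) (outB ++ [a]) _ hnd' hsubA' hsubl'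
              (by rw [hfilter, List.filter_append]; simp [hpm]) hseenA' hseen'
          · have hpm' : pvB_maximal tb a = false := by simpa using hpm
            have hcond : (!(PySem.Set.contains seen a) && pvB_maximal tb a) = false := by
              rw [hpm']; simp
            have hstep : pvB_step tb (outB, seen) a = (outB, seen.add a) := by
              unfold pvB_step; rw [hcond]; simp
            rw [hstep]
            exact ih (outA ++ [a]) outB _ hnd' hsubA' hsubl'
              (by rw [hfilter, List.filter_append]; simp [hpm']) hseenA' hseen'

-- ===== VERDICT (by name: the statement is the Claim_ definition above) =====
theorem clear_same_contig_spec : Claim_equal_clear_same_contig := by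
  intro tb _
  unfold Spec_clear_same_contig clear_same_contig clear_same_contig_alt
  have hnd : (tb.foldl pvA_keep1 []).Nodup := pvA1_nodup tb [] List.nodup_nil
  rw [pvA2_filter _ _ _ hnd (by simp)]
  have := pv_main tb tb [] [] PySem.Set.empty List.nodup_nil (by simp) (fun _ h => h)
      (by simp) (by simp) (by simp [PySem.Set.empty])
  rw [this, List.nil_append]
  exact (List.filter_congr (fun i _ => by rw [pv_cond_eq tb i, Bool.not_not])).symm
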